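-- pv_equiv track=rewrite | github.com/Schrodinger73/Cricket-Scorecard-SQL | Cricket_SQL.py | batting_second
-- ===== SOURCE A (Python) =====
-- def sum_array(a):
--     sum = 0
--     for i in range(0, len(a)):
--         sum += a[i]
--     return sum
--
-- def total(a):
--     total = sum_array(a) - 5*a.count(5)
--     return total
--
-- def batting_second(a, n):
--     ar = []
--     if total(a) <= n:
--         ar = a
--     if total(a) > n:
--         for i in range(0, len(a)):
--             if total(a[:i]) <= n and total(a[:i + 1]) > n:
--                 ar = a[:i + 1]
--     return ar
-- ===== SOURCE B (Python) =====
-- def batting_second(a, n):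
--     s = 0
--     last = None
--     for i, x in enumerate(a):
--         s2 = s + (0 if x == 5 else x)
--         if s <= n < s2:
--             last = i
--         s = s2
--     if s <= n:
--         return a
--     if last is None:
--         return []
--     return a[:last + 1]
-- ===== Notes on version B (the rewrite author's own statement) =====
-- stated objective: faster
-- what changed: Replace the quadratic loop that re-sums every prefix (and the whole list) with a single pass that maintains the running '5s count as 0' total and remembers the last index where it crosses n.
import Mathlib
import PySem

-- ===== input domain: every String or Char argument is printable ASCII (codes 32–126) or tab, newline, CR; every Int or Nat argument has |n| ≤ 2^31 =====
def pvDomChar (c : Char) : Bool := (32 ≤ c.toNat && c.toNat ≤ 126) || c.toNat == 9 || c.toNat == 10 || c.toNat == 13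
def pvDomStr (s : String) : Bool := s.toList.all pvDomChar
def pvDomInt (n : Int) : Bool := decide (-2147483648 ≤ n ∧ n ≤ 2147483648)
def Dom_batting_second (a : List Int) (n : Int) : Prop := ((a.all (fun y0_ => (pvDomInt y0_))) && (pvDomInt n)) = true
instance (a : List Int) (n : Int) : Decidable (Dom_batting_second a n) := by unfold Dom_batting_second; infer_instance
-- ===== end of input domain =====

-- B replaces A's quadratic re-summation of every prefix by one pass keeping a running
-- adjusted total and the last crossing index (objective: faster, asymptotic O(n^2) → O(n)).

-- ===== PORT A =====
-- helper sum_array: 'for i in range(0, len(a)): sum += a[i]'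
def pvSumArray (a : List Int) : Int :=
  (PySem.List.pyRange 0 (a.length : Int) 1).foldl (fun s i => s + PySem.List.pyGetD a i 0) 0

-- helper total: sum_array(a) - 5*a.count(5)
def pvTotal (a : List Int) : Int := pvSumArray a - 5 * (PySem.List.count a 5 : Int)

def batting_second (a : List Int) (n : Int) : List Int :=
  let ar : List Int := []
  let ar := if pvTotal a ≤ n then a else ar
  if pvTotal a > n then
    (PySem.List.pyRange 0 (a.length : Int) 1).foldl
      (fun ar i =>
        if pvTotal (PySem.List.slice a none (some i)) ≤ n ∧
           pvTotal (PySem.List.slice a none (some (i + 1))) > n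
        then PySem.List.slice a none (some (i + 1)) else ar) ar
  else ar

-- ===== PORT B =====
-- one loop step of Source B: s2 = s + (0 if x == 5 else x); if s <= n < s2: last = i
def pvStep (n : Int) (st : Int × Option Int) (p : Int × Int) : Int × Option Int :=
  let s2 := st.1 + (if p.2 = 5 then 0 else p.2)
  (s2, if st.1 ≤ n ∧ n < s2 then some p.1 else st.2)

def batting_second_alt (a : List Int) (n : Int) : List Int :=
  let st := (PySem.List.enumerate a 0).foldl (pvStep n) ((0 : Int), (none : Option Int))
  if st.1 ≤ n then a
  else
    match st.2 with
    | none => []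
    | some i => PySem.List.slice a none (some (i + 1))

-- ===== PRECONDITION & SPEC =====
def Spec_batting_second (a : List Int) (n : Int) (out : List Int) : Prop := out = batting_second_alt a n
instance (a : List Int) (n : Int) (out : List Int) : Decidable (Spec_batting_second a n out) := by unfold Spec_batting_second; infer_instance

-- ===== CLAIM (what is proved, stated in full; the proofs are below) =====
def Claim_equal_batting_second : Prop := ∀ (a : List Int) (n : Int), Dom_batting_second a n → Spec_batting_second a n (batting_second a n)

-- ===== LEMMAS AND PROOFS =====

-- the adjusted value of one element (5 counts as 0) and the adjusted sum
def pvAdj (x : Int) : Int := if x = 5 then 0 else x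
def pvPsum (l : List Int) : Int := (l.map pvAdj).sum

lemma pvPsum_append_singleton (l : List Int) (x : Int) :
    pvPsum (l ++ [x]) = pvPsum l + pvAdj x := by
  simp [pvPsum]

lemma pvSum_sub_count (l : List Int) : l.sum - 5 * (l.count 5 : Int) = pvPsum l := by
  induction l with
  | nil => simp [pvPsum]
  | cons y ys ih =>
    simp only [List.sum_cons, List.count_cons, pvPsum, List.map_cons, List.sum_cons, pvAdj] at *
    by_cases hy : y = 5 <;> simp [hy] <;> omega

lemma pvTotal_eq (l : List Int) : pvTotal l = pvPsum l := by
  have h1 : pvSumArray l = l.sum := by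
    unfold pvSumArray
    rw [PySem.List.foldl_pyRange_zero_pyGetD' l 0 (fun acc v => acc + v) 0,
        PySem.List.foldl_add]
    simp
  unfold pvTotal
  rw [h1, PySem.List.count_eq, pvSum_sub_count]

-- prefix slices of l ++ [x] agree with those of l
lemma pvSlice_append (l : List Int) (x : Int) (b : Int) (h0 : 0 ≤ b) (hb : b ≤ (l.length : Int)) :
    PySem.List.slice (l ++ [x]) none (some b) = PySem.List.slice l none (some b) := by
  rw [PySem.List.slice_to _ h0, PySem.List.slice_to _ h0]
  rw [List.take_append_of_le_length]
  omega

-- slicing to (or past) the length gives the whole list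
lemma pvSlice_full (l : List Int) (b : Int) (h : (l.length : Int) ≤ b) :
    PySem.List.slice l none (some b) = l := by
  rw [PySem.List.slice_to _ (by omega)]
  exact List.take_of_length_le (by omega)

-- the body of A's loop, named for the induction
def pvBodyA (a : List Int) (n : Int) (ar : List Int) (i : Int) : List Int :=
  if pvTotal (PySem.List.slice a none (some i)) ≤ n ∧
     pvTotal (PySem.List.slice a none (some (i + 1))) > n
  then PySem.List.slice a none (some (i + 1)) else ar

-- the combined invariant: B's state carries the adjusted sum, an in-range last index,
-- and A's loop result is determined by that index
lemma pvKey (n : Int) (a : List Int) :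
    ((PySem.List.enumerate a 0).foldl (pvStep n) ((0 : Int), (none : Option Int))).1 = pvPsum a ∧
    (∀ i, ((PySem.List.enumerate a 0).foldl (pvStep n) ((0 : Int), (none : Option Int))).2 = some i →
        0 ≤ i ∧ i < (a.length : Int)) ∧
    (PySem.List.pyRange 0 (a.length : Int) 1).foldl (pvBodyA a n) [] =
      (match ((PySem.List.enumerate a 0).foldl (pvStep n) ((0 : Int), (none : Option Int))).2 with
       | none => ([] : List Int)
       | some i => PySem.List.slice a none (some (i + 1))) := by
  induction a using List.reverseRecOn with
  | nil =>
    refine ⟨rfl, ?_, ?_⟩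
    · intro i h; simp [PySem.List.enumerate] at h
    · simp [PySem.List.pyRange_one_eq_nil, PySem.List.enumerate]
  | append_singleton l x ih =>
    obtain ⟨ih1, ih2, ih3⟩ := ih
    have henum : PySem.List.enumerate (l ++ [x]) 0
        = PySem.List.enumerate l 0 ++ [((l.length : Int), x)] := by
      rw [PySem.List.enumerate_append]
      simp [PySem.List.enumerate]
    set st := (PySem.List.enumerate l 0).foldl (pvStep n) ((0 : Int), (none : Option Int)) with hst
    have hfold : (PySem.List.enumerate (l ++ [x]) 0).foldl (pvStep n) ((0 : Int), (none : Option Int))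
        = pvStep n st ((l.length : Int), x) := by
      rw [henum, List.foldl_append]
      simp only [List.foldl_cons, List.foldl_nil]
      rw [hst]
    have hlen : ((l ++ [x]).length : Int) = (l.length : Int) + 1 := by
      simp
    have hcond : pvStep n st ((l.length : Int), x)
        = (st.1 + pvAdj x, if st.1 ≤ n ∧ n < st.1 + pvAdj x then some (l.length : Int) else st.2) := by
      simp [pvStep, pvAdj]
    refine ⟨?_, ?_, ?_⟩
    · rw [hfold, hcond, ih1, pvPsum_append_singleton]
    · intro i h
      rw [hfold, hcond] at h
      by_cases hc : st.1 ≤ n ∧ n < st.1 + pvAdj x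
      · simp [hc] at h; subst h; constructor <;> [positivity; omega]
      · simp [hc] at h
        have := ih2 i h
        omega
    · -- the range fold over l ++ [x]
      have hsplit : PySem.List.pyRange 0 (((l ++ [x]).length : Int)) 1
          = PySem.List.pyRange 0 (l.length : Int) 1 ++ [(l.length : Int)] := by
        rw [hlen, PySem.List.pyRange_one_succ_right (by positivity)]
      rw [hsplit, List.foldl_append]
      -- inner fold: bodies agree on i ∈ range
      have hinner : (PySem.List.pyRange 0 (l.length : Int) 1).foldl (pvBodyA (l ++ [x]) n) []
          = (PySem.List.pyRange 0 (l.length : Int) 1).foldl (pvBodyA l n) [] := by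
        apply PySem.List.foldl_congr_mem
        intro acc i hi
        rw [PySem.List.mem_pyRange_one] at hi
        unfold pvBodyA
        rw [pvSlice_append l x i hi.1 (by omega), pvSlice_append l x (i + 1) (by omega) (by omega)]
      rw [hinner, ih3]
      -- the final step at index l.length
      simp only [List.foldl_cons, List.foldl_nil]
      unfold pvBodyA
      rw [pvSlice_append l x (l.length : Int) (by positivity) (le_refl _),
          pvSlice_full l _ (le_refl _), pvSlice_full (l ++ [x]) _ (by omega)]
      rw [pvTotal_eq l, pvTotal_eq (l ++ [x]), pvPsum_append_singleton]
      rw [hfold, hcond, ih1]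
      by_cases hc : pvPsum l ≤ n ∧ n < pvPsum l + pvAdj x
      · simp only [gt_iff_lt]
        rw [if_pos hc, if_pos hc]
        exact (pvSlice_full _ _ (by simp)).symm
      · have hc' : ¬ (pvPsum l ≤ n ∧ pvPsum l + pvAdj x > n) := by
          intro h; exact hc ⟨h.1, h.2⟩
        simp only [hc', if_false, gt_iff_lt]

        cases hopt : st.2 with
        | none => simp
        | some i =>
          have hi := ih2 i hopt
          simp only
          rw [pvSlice_append l x (i + 1) (by omega) (by omega)]

-- ===== VERDICT (by name: the statement is the Claim_ definition above) =====
theorem batting_second_spec : Claim_equal_batting_second := by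
  intro a n _
  unfold Spec_batting_second batting_second batting_second_alt
  obtain ⟨h1, _, h3⟩ := pvKey n a
  rw [pvTotal_eq a]
  by_cases hle : pvPsum a ≤ n
  · simp only [hle, if_true, h1, gt_iff_lt, not_lt.mpr hle, if_false]
  · have hgt : pvPsum a > n := by omega
    simp only [hle, if_false, hgt, if_true, h1]
    have hbody : (PySem.List.pyRange 0 (a.length : Int) 1).foldl
        (fun ar i =>
          if pvTotal (PySem.List.slice a none (some i)) ≤ n ∧
             pvTotal (PySem.List.slice a none (some (i + 1))) > n
          then PySem.List.slice a none (some (i + 1)) else ar) []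
        = (PySem.List.pyRange 0 (a.length : Int) 1).foldl (pvBodyA a n) [] := rfl
    rw [hbody, h3]
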